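-- pv_equiv track=rewrite | github.com/ChoiHongYong/Hong | Product.py | getNewStr
-- ===== SOURCE A (Python) =====
-- def getNewStr(inputData):
--     newStr = ""
--     ########################여기부터 구현 (1) ---------------->
--     tmpStr = ""
--     for cToStr in  inputData:
--         if isNum(cToStr):
--             tmpStr += cToStr
--         else:
--             newStr += cToStr
--     newStr += tmpStr
--     ############################# <-------------- 여기까지 구현 (1)
--     return newStr
--
-- def isNum(num):
--     return str(num).isdigit()
-- ===== SOURCE B (Python) =====
-- def isNum(num):
--     return str(num).isdigit()
--
-- def getNewStr(inputData):
--     # stable sort: non-digits (key False) keep order and precede digits (key True)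
--     return "".join(sorted(inputData, key=isNum))
-- ===== Notes on version B (the rewrite author's own statement) =====
-- stated objective: idiomatic
-- what changed: Replaces the two-accumulator concatenation loop with a single stable sort keyed on the digit test (non-digits, key False, keep order and precede digits, key True).
import Mathlib
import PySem

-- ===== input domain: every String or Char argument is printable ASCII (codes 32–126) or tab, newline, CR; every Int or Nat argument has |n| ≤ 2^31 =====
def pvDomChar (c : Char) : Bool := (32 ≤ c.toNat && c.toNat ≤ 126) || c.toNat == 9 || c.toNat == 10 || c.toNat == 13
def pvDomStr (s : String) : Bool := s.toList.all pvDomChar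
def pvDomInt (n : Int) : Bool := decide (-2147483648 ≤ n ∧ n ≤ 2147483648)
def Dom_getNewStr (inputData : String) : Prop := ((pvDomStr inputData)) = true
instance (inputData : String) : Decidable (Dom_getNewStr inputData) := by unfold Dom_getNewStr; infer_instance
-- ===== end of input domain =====

-- B replaces A's two-accumulator scan with one stable sort keyed on the digit test (same output).

-- isNum(num) = str(num).isdigit(); on a single character this is the ASCII digit test
def isNum (c : Char) : Bool := PySem.Chars.strIsdigit [c]

-- ===== PORT A =====
-- two accumulators (newStr, tmpStr); digits go to tmpStr, the rest to newStr; result newStr ++ tmpStr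
def getNewStr (inputData : String) : String :=
  let st := inputData.toList.foldl
    (fun (st : List Char × List Char) (c : Char) =>
      if isNum c then (st.1, st.2 ++ [c]) else (st.1 ++ [c], st.2))
    ([], [])
  String.mk (st.1 ++ st.2)

-- ===== PORT B =====
-- "".join(sorted(inputData, key=isNum)) — stable sort on the Bool key (False < True)
def getNewStr_alt (inputData : String) : String :=
  String.mk (PySem.List.sorted inputData.toList (fun c => isNum c) false)

-- ===== PRECONDITION & SPEC =====
def Spec_getNewStr (inputData : String) (out : String) : Prop := out = getNewStr_alt inputData
instance (inputData : String) (out : String) : Decidable (Spec_getNewStr inputData out) := by unfold Spec_getNewStr; infer_instance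

-- ===== CLAIM (what is proved, stated in full; the proofs are below) =====
def Claim_equal_getNewStr : Prop := ∀ (inputData : String), Dom_getNewStr inputData → Spec_getNewStr inputData (getNewStr inputData)

-- ===== LEMMAS AND PROOFS =====

-- A's loop: starting from (a, b) it appends the non-digits to a and the digits to b
theorem foldA_eq (l : List Char) : ∀ (a b : List Char),
    l.foldl (fun (st : List Char × List Char) (c : Char) =>
      if isNum c then (st.1, st.2 ++ [c]) else (st.1 ++ [c], st.2)) (a, b)
    = (a ++ l.filter (fun c => !isNum c), b ++ l.filter (fun c => isNum c)) := by
  induction l with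
  | nil => intro a b; simp
  | cons c l ih =>
    intro a b
    by_cases h : isNum c = true <;> simp [List.foldl_cons, h, ih]

-- inserting a non-digit into (non-digits ++ digits) puts it at the end of the non-digits
theorem insert_nondigit (x : Char) (hx : isNum x = false) :
    ∀ (as bs : List Char), (∀ a ∈ as, isNum a = false) → (∀ b ∈ bs, isNum b = true) →
    PySem.List.insertBy (fun a b => decide ((isNum a) < (isNum b))) x (as ++ bs)
      = (as ++ [x]) ++ bs := by
  intro as
  induction as with
  | nil =>
    intro bs _ hbs
    cases bs with
    | nil => simp [PySem.List.insertBy]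
    | cons b bs => simp [PySem.List.insertBy, hbs b (by simp), hx, Bool.lt_iff]
  | cons a as ih =>
    intro bs has hbs
    have ha : isNum a = false := has a (by simp)
    have hcond : decide ((isNum x) < (isNum a)) = false := by simp [hx, ha]
    simp only [List.cons_append, PySem.List.insertBy, hcond]
    simp [ih bs (fun a h => has a (by simp [h])) hbs]

-- inserting a digit puts it at the very end
theorem insert_digit (x : Char) (hx : isNum x = true) (ys : List Char) :
    PySem.List.insertBy (fun a b => decide ((isNum a) < (isNum b))) x ys = ys ++ [x] := by
  apply PySem.List.insertBy_of_forall_not_before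
  intro y _
  simp [Bool.lt_iff, hx]

-- the insertion-sort fold keeps the shape (non-digits so far) ++ (digits so far)
theorem foldB_eq (l : List Char) : ∀ (as bs : List Char),
    (∀ a ∈ as, isNum a = false) → (∀ b ∈ bs, isNum b = true) →
    l.foldl (fun acc x => PySem.List.insertBy (fun a b => decide ((isNum a) < (isNum b))) x acc) (as ++ bs)
    = (as ++ l.filter (fun c => !isNum c)) ++ (bs ++ l.filter (fun c => isNum c)) := by
  induction l with
  | nil => intro as bs _ _; simp
  | cons c l ih =>
    intro as bs has hbs
    by_cases h : isNum c = true
    · rw [List.foldl_cons, insert_digit c h, List.append_assoc as bs [c],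
        ih as (bs ++ [c]) has
          (by intro b hb; rcases List.mem_append.mp hb with h' | h'
              · exact hbs b h'
              · simp at h'; simpa [h'] using h)]
      simp [h]
    · have h' : isNum c = false := by simpa using h
      rw [List.foldl_cons, insert_nondigit c h' as bs has hbs,
        ih (as ++ [c]) bs
          (by intro a ha; rcases List.mem_append.mp ha with h2 | h2
              · exact has a h2
              · simp at h2; simpa [h2] using h')
          hbs]
      simp [h']

theorem sorted_key_isNum (l : List Char) :
    PySem.List.sorted l (fun c => isNum c) false
      = l.filter (fun c => !isNum c) ++ l.filter (fun c => isNum c) := by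
  rw [PySem.List.sorted_eq_foldl_insertBy]
  have := foldB_eq l [] [] (by simp) (by simp)
  simpa using this

-- ===== VERDICT (by name: the statement is the Claim_ definition above) =====
theorem getNewStr_spec : Claim_equal_getNewStr := by
  intro s _
  simp only [Spec_getNewStr, getNewStr, getNewStr_alt, sorted_key_isNum, foldA_eq,
    List.nil_append]
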